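-- pv_equiv track=rewrite | github.com/omarabb315/arabic-voice-pipeline | training/finetune-orpheus-standard.py | remove_duplicate_frames
-- ===== SOURCE A (Python) =====
-- def remove_duplicate_frames(codes_list):
--     """
--     Remove duplicate consecutive frames from SNAC codes.
--     Frames are identified by their first token (every 7 tokens).
--     """
--     if len(codes_list) % 7 != 0:
--         raise ValueError("Codes list length must be divisible by 7")
--
--     result = codes_list[:7]
--
--     for i in range(7, len(codes_list), 7):
--         current_first = codes_list[i]
--         previous_first = result[-7]
--
--         if current_first != previous_first:
--             result.extend(codes_list[i:i+7])
--
--     return result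
-- ===== SOURCE B (Python) =====
-- def remove_duplicate_frames(codes_list):
--     if len(codes_list) % 7 != 0:
--         raise ValueError("Codes list length must be divisible by 7")
--     frames = [codes_list[i:i + 7] for i in range(0, len(codes_list), 7)]
--     kept = [f for j, f in enumerate(frames) if j == 0 or f[0] != frames[j - 1][0]]
--     return [tok for f in kept for tok in f]
-- ===== Notes on version B (the rewrite author's own statement) =====
-- stated objective: idiomatic
-- what changed: A's single index-stepping loop, which compares the current frame's first token against the token 7 places from the end of the mutable result, is replaced by a frame-level pipeline: chunk into 7-token frames, keep each frame whose first token differs from the previous frame's first token, and flatten; correctness relies on the last kept frame's first token always equalling the previous frame's first token.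
import Mathlib
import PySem

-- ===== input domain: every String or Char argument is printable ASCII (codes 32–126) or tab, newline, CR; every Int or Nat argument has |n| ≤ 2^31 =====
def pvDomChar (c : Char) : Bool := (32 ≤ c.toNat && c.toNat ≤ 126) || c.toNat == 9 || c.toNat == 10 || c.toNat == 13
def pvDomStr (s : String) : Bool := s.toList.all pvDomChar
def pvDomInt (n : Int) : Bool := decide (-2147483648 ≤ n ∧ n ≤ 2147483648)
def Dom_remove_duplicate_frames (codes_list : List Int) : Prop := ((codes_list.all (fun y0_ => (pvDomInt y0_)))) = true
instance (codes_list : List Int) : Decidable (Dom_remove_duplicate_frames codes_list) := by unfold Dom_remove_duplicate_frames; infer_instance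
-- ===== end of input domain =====

-- B replaces A's index-stepping loop (comparing codes_list[i] to result[-7]) by a frame-level
-- pipeline: split into 7-token frames, keep each frame whose first token differs from the
-- previous frame's first token, and flatten. Objective: more idiomatic decomposition; A mutates
-- no argument; return values are proved equal on all inputs where A does not raise.


-- ===== PORT A =====
def remove_duplicate_frames (codes_list : List Int) : List Int :=
  -- result = codes_list[:7]; for i in range(7, len, 7): if codes_list[i] != result[-7]: result.extend(codes_list[i:i+7])
  (PySem.List.pyRange 7 (codes_list.length : Int) 7).foldl
    (fun result i =>
      let current_first := PySem.List.pyGetD codes_list i 0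
      let previous_first := PySem.List.pyGetD result (-7) 0
      if current_first ≠ previous_first then
        result ++ PySem.List.slice codes_list (some i) (some (i + 7))
      else result)
    (PySem.List.slice codes_list none (some 7))

-- ===== PORT B =====
def remove_duplicate_frames_alt (codes_list : List Int) : List Int :=
  let frames := (PySem.List.pyRange 0 (codes_list.length : Int) 7).map
      (fun i => PySem.List.slice codes_list (some i) (some (i + 7)))
  let kept := ((PySem.List.enumerate frames).filter
      (fun jf => jf.1 == 0 ||
        PySem.List.pyGetD jf.2 0 0 != PySem.List.pyGetD (PySem.List.pyGetD frames (jf.1 - 1) []) 0 0)).map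
      (fun jf => jf.2)
  kept.flatten

-- ===== PRECONDITION & SPEC =====
-- Pre_ excludes exactly the inputs where A raises ValueError (length not divisible by 7).
def Pre_remove_duplicate_frames (codes_list : List Int) : Prop := codes_list.length % 7 = 0
instance (codes_list : List Int) : Decidable (Pre_remove_duplicate_frames codes_list) := by unfold Pre_remove_duplicate_frames; infer_instance
def pvWitness_remove_duplicate_frames : List Int := [1, 2, 3, 4, 5, 6, 7, 1, 9, 9, 9, 9, 9, 9]

def Spec_remove_duplicate_frames (codes_list : List Int) (out : List Int) : Prop := out = remove_duplicate_frames_alt codes_list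
instance (codes_list : List Int) (out : List Int) : Decidable (Spec_remove_duplicate_frames codes_list out) := by unfold Spec_remove_duplicate_frames; infer_instance

-- ===== CLAIM (what is proved, stated in full; the proofs are below) =====
def Claim_equal_remove_duplicate_frames : Prop := ∀ (codes_list : List Int), Dom_remove_duplicate_frames codes_list → Pre_remove_duplicate_frames codes_list → Spec_remove_duplicate_frames codes_list (remove_duplicate_frames codes_list)

-- ===== LEMMAS AND PROOFS =====

-- frame j of L (7 tokens starting at 7*j)
def pvF (L : List Int) (j : Nat) : List Int := (L.drop (7 * j)).take 7

-- flattened kept frames among frames 0..m ("keep frame j iff its first token differs from frame j-1's")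
def pvG (L : List Int) : Nat → List Int
  | 0 => pvF L 0
  | m + 1 => if L.getD (7 * (m + 1)) 0 ≠ L.getD (7 * m) 0 then pvG L m ++ pvF L (m + 1) else pvG L m

theorem pvF_length (L : List Int) (j : Nat) (h : 7 * (j + 1) ≤ L.length) : (pvF L j).length = 7 := by
  simp [pvF]; omega

theorem pvF_getD0 (L : List Int) (j : Nat) (h : 7 * j < L.length) :
    (pvF L j).getD 0 0 = L.getD (7 * j) 0 := by
  simp [pvF, List.getD_eq_getElem?_getD, List.getElem?_drop]

theorem pvG_inv (L : List Int) (m : Nat) (h : 7 * (m + 1) ≤ L.length) :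
    (pvG L m).length % 7 = 0 ∧ 7 ≤ (pvG L m).length ∧
      PySem.List.pyGetD (pvG L m) (-7) 0 = L.getD (7 * m) 0 := by
  induction m with
  | zero =>
    have e0 : pvG L 0 = pvF L 0 := rfl
    have h7 : (pvF L 0).length = 7 := pvF_length L 0 h
    refine ⟨by rw [e0, h7], by rw [e0, h7], ?_⟩
    rw [e0, PySem.List.pyGetD_neg_ofNat _ 7 0 (by omega) (by omega),
      ← pvF_getD0 L 0 (by omega)]
    simp [h7, List.getD_eq_getElem?_getD]
  | succ m ih =>
    obtain ⟨h1, h2, h3⟩ := ih (by omega)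
    have hF : (pvF L (m + 1)).length = 7 := pvF_length L (m + 1) h
    by_cases hc : L.getD (7 * (m + 1)) 0 ≠ L.getD (7 * m) 0
    · have e : pvG L (m + 1) = pvG L m ++ pvF L (m + 1) := by rw [pvG, if_pos hc]
      have hlen : (pvG L (m + 1)).length = (pvG L m).length + 7 := by
        rw [e, List.length_append, hF]
      refine ⟨by omega, by omega, ?_⟩
      rw [e, PySem.List.pyGetD_neg_ofNat _ 7 0 (by omega) (by rw [List.length_append, hF]; omega),
        ← pvF_getD0 L (m + 1) (by omega)]
      rw [List.getElem_append_right (by rw [List.length_append, hF]; omega)]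
      simp [hF, List.getD_eq_getElem?_getD]
    · rw [not_ne_iff] at hc
      have e : pvG L (m + 1) = pvG L m := by rw [pvG, if_neg (by simpa using hc)]
      exact ⟨e ▸ h1, e ▸ h2, by rw [e, h3, hc]⟩

-- the A-side fold over the first m loop iterations equals pvG L m
theorem pvA_fold (L : List Int) (n : Nat) (hL : L.length = 7 * n) (m : Nat) (h : m + 1 ≤ n) :
    (List.range m).foldl
      (fun (result : List Int) (k : Nat) =>
        let i : Int := 7 + 7 * (k : Int)
        let current_first := PySem.List.pyGetD L i 0
        let previous_first := PySem.List.pyGetD result (-7) 0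
        if current_first ≠ previous_first then
          result ++ PySem.List.slice L (some i) (some (i + 7))
        else result)
      (pvF L 0) = pvG L m := by
  induction m with
  | zero => rfl
  | succ m ih =>
    rw [List.range_succ, List.foldl_append, ih (by omega)]
    simp only [List.foldl_cons, List.foldl_nil]
    have hcast : (7 : Int) + 7 * (m : Int) = ((7 * (m + 1) : Nat) : Int) := by push_cast; ring
    obtain ⟨h1, h2, h3⟩ := pvG_inv L m (by omega)
    rw [hcast, PySem.List.pyGetD_natCast, h3]
    have hslice : PySem.List.slice L (some ((7 * (m + 1) : Nat) : Int)) (some (((7 * (m + 1) : Nat) : Int) + 7)) = pvF L (m + 1) := by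
      have : ((7 * (m + 1) : Nat) : Int) + 7 = ((7 * (m + 1) : Nat) : Int) + ((7 : Nat) : Int) := by norm_num
      rw [this, PySem.List.slice_natCast_add]
      rfl
    rw [hslice]
    by_cases hc : L.getD (7 * (m + 1)) 0 ≠ L.getD (7 * m) 0
    · simp [pvG]
    · rw [not_ne_iff] at hc
      simp [pvG]

-- the B-side filtered/flattened prefix of m+1 frames equals pvG L m
theorem pvB_fold (L : List Int) (n : Nat) (hL : L.length = 7 * n) (m : Nat) (h : m + 1 ≤ n) :
    ((((PySem.List.enumerate ((List.range (m + 1)).map (pvF L))).filter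
      (fun jf => jf.1 == 0 ||
        PySem.List.pyGetD jf.2 0 0 != PySem.List.pyGetD (PySem.List.pyGetD ((List.range n).map (pvF L)) (jf.1 - 1) []) 0 0)).map
      (fun jf => jf.2)).flatten) = pvG L m := by
  induction m with
  | zero =>
    have h1 : List.range (0 + 1) = [0] := rfl
    rw [h1]
    simp [PySem.List.enumerate_cons, PySem.List.enumerate_nil]
    rfl
  | succ m ih =>
    rw [show m + 1 + 1 = (m + 1) + 1 from rfl, List.range_succ, List.map_append,
      PySem.List.enumerate_append, List.filter_append, List.map_append, List.flatten_append,
      ih (by omega)]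
    simp only [List.length_map, List.length_range, List.map_cons, List.map_nil,
      PySem.List.enumerate_cons, PySem.List.enumerate_nil, List.filter_cons, List.filter_nil]
    have hfst : (((0 : Int) + ((m + 1 : Nat) : Int) == 0) = false) := by
      rw [beq_eq_false_iff_ne]; omega
    have hidx : (0 : Int) + ((m + 1 : Nat) : Int) - 1 = ((m : Nat) : Int) := by push_cast; ring
    have hframes : PySem.List.pyGetD ((List.range n).map (pvF L)) (((m : Nat) : Int)) [] = pvF L m := by
      rw [PySem.List.pyGetD_natCast, PySem.List.getD_map_range (pvF L) n m [] (by omega)]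
    have hcur : PySem.List.pyGetD (pvF L (m + 1)) 0 0 = L.getD (7 * (m + 1)) 0 := by
      rw [PySem.List.pyGetD_zero, pvF_getD0 L (m + 1) (by omega)]
    have hprev : PySem.List.pyGetD (pvF L m) 0 0 = L.getD (7 * m) 0 := by
      rw [PySem.List.pyGetD_zero, pvF_getD0 L m (by omega)]
    simp only [hfst, hidx, hframes, hcur, hprev, Bool.false_or]
    by_cases hc : L.getD (7 * (m + 1)) 0 ≠ L.getD (7 * m) 0
    · rw [pvG, if_pos hc, if_pos (bne_iff_ne.mpr hc)]
      simp
    · rw [not_ne_iff] at hc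
      have hb : (L.getD (7 * (m + 1)) 0 != L.getD (7 * m) 0) = false := by
        rw [bne_eq_false_iff_eq]; exact hc
      rw [pvG, if_neg (show ¬((L.getD (7 * (m + 1)) 0 != L.getD (7 * m) 0) = true) by simp only [hb]; exact Bool.false_ne_true), if_neg (fun hne => hne hc)]
      simp

-- ===== VERDICT (by name: the statement is the Claim_ definition above) =====
theorem remove_duplicate_frames_spec : Claim_equal_remove_duplicate_frames := by
  intro L _ hPre
  unfold Pre_remove_duplicate_frames at hPre
  show remove_duplicate_frames L = remove_duplicate_frames_alt L
  obtain ⟨n, hL⟩ : ∃ n, L.length = 7 * n := ⟨L.length / 7, by omega⟩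
  rcases Nat.eq_zero_or_pos n with h0 | hn
  · subst h0
    have : L = [] := List.eq_nil_of_length_eq_zero (by omega)
    subst this
    decide
  · -- count of A's loop iterations is n - 1
    have hA : remove_duplicate_frames L = pvG L (n - 1) := by
      unfold remove_duplicate_frames
      rw [PySem.List.pyRange_of_pos 7 (L.length : Int) (by norm_num)]
      have hdiv : (((L.length : Int) - 7 + 7 - 1) / 7) = (n : Int) - 1 := by
        rw [hL]
        have : ((7 * n : Nat) : Int) - 7 + 7 - 1 = 6 + ((n : Int) - 1) * 7 := by push_cast; ring
        rw [this, Int.add_mul_ediv_right 6 ((n : Int) - 1) (by norm_num)]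
        norm_num
      have hcnt : (if (7 : Int) < (L.length : Int) then (((L.length : Int) - 7 + 7 - 1) / 7).toNat else 0) = n - 1 := by
        rw [hdiv]
        split_ifs with h7
        · omega
        · rw [hL] at h7; push_cast at h7; omega
      rw [hcnt, List.foldl_map]
      have hinit : PySem.List.slice L none (some 7) = pvF L 0 := by
        rw [show (7 : Int) = ((7 : Nat) : Int) from rfl, PySem.List.slice_to_natCast]
        simp [pvF]
      rw [hinit]
      exact pvA_fold L n hL (n - 1) (by omega)
    have hB : remove_duplicate_frames_alt L = pvG L (n - 1) := by
      unfold remove_duplicate_frames_alt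
      rw [PySem.List.pyRange_of_pos 0 (L.length : Int) (by norm_num)]
      have hdiv : (((L.length : Int) - 0 + 7 - 1) / 7) = (n : Int) := by
        rw [hL]
        have : ((7 * n : Nat) : Int) - 0 + 7 - 1 = 6 + (n : Int) * 7 := by push_cast; ring
        rw [this, Int.add_mul_ediv_right 6 ((n : Int)) (by norm_num)]
        norm_num
      have hcnt : (if (0 : Int) < (L.length : Int) then (((L.length : Int) - 0 + 7 - 1) / 7).toNat else 0) = n := by
        rw [hdiv]
        split_ifs with h7
        · omega
        · rw [hL] at h7; push_cast at h7; omega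
      rw [hcnt, List.map_map]
      have hmap : (List.range n).map ((fun i => PySem.List.slice L (some i) (some (i + 7))) ∘ fun (k : Nat) => 0 + 7 * (k : Int)) = (List.range n).map (pvF L) := by
        apply List.map_congr_left
        intro k _
        show PySem.List.slice L (some (0 + 7 * (k : Int))) (some (0 + 7 * (k : Int) + 7)) = pvF L k
        have e1 : (0 : Int) + 7 * (k : Int) = ((7 * k : Nat) : Int) := by push_cast; ring
        rw [e1, show ((7 * k : Nat) : Int) + 7 = ((7 * k : Nat) : Int) + ((7 : Nat) : Int) from by norm_num,
          PySem.List.slice_natCast_add]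
        rfl
      rw [hmap]
      have hn' : n = (n - 1) + 1 := by omega
      rw [hn']
      exact pvB_fold L ((n - 1) + 1) (by omega) (n - 1) (by omega)
    rw [hA, hB]
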